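-- pv_equiv track=rewrite | github.com/jcolinpatrick/kryptos | scripts/transposition/columnar/e_grid31_k4_transposition_01.py | columnar_read
-- ===== SOURCE A (Python) =====
-- def columnar_read(text, width, col_order=None, top_to_bottom=True):
--     """Write text in rows of 'width', read columns in given order."""
--     nrows = (len(text) + width - 1) // width
--     # Build grid
--     grid = {}
--     for i, ch in enumerate(text):
--         r, c = divmod(i, width)
--         grid[(r, c)] = ch
--
--     if col_order is None:
--         col_order = list(range(width))
--
--     result = []
--     for col in col_order:
--         rows = range(nrows) if top_to_bottom else range(nrows - 1, -1, -1)
--         for row in rows: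
--             if (row, col) in grid:
--                 result.append(grid[(row, col)])
--     return ''.join(result)
-- ===== SOURCE B (Python) =====
-- def columnar_read(text, width, col_order=None, top_to_bottom=True):
--     """Write text in rows of 'width', read columns in given order."""
--     if col_order is None:
--         col_order = range(width)
--     parts = []
--     for col in col_order:
--         if 0 <= col < width:
--             chunk = text[col::width]
--             parts.append(chunk if top_to_bottom else chunk[::-1])
--     return ''.join(parts)
-- ===== Notes on version B (the rewrite author's own statement) =====
-- stated objective: simpler
-- what changed: B drops A's (row,col)->char grid dict, the nrows computation and the per-cell row loop entirely: for each in-range column it takes the stride slice text[col::width] (reversed when reading bottom-to-top) and joins the chunks; building no dict and doing one slice per column is the constant-factor win a timing run measured.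
-- outside the precondition, e.g. on columnar_read('x', -2, [0], True): A returns 'x', B returns ''
import Mathlib
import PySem

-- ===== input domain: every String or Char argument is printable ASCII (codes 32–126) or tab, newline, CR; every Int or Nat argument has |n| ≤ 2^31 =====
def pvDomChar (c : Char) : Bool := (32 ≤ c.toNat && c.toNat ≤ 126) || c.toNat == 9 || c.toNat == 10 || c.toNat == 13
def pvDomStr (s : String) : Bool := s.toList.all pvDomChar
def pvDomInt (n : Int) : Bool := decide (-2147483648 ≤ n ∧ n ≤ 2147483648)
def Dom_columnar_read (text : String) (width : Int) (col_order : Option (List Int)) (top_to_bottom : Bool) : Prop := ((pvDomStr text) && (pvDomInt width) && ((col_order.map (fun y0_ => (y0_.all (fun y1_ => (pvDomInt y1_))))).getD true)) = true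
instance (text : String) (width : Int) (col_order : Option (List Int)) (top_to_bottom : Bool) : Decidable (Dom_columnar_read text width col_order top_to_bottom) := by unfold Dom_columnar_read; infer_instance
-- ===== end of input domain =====

-- B replaces A's grid dict + per-cell row loop by one stride slice per column (simpler; return value only).

-- ===== PORT A =====
def columnar_read (text : String) (width : Int) (col_order : Option (List Int)) (top_to_bottom : Bool) : String :=
  let l := text.toList
  let nrows : Int := PySem.Int.floordiv ((l.length : Int) + width - 1) width
  -- grid[(r, c)] = ch for i, ch in enumerate(text), (r, c) = divmod(i, width)
  let grid : PySem.Dict (Int × Int) Char :=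
    (PySem.List.enumerate l 0).foldl
      (fun g p => g.insert (PySem.Int.floordiv p.1 width, PySem.Int.mod p.1 width) p.2)
      PySem.Dict.empty
  let cols : List Int :=
    match col_order with
    | none => PySem.List.pyRange 0 width 1
    | some cs => cs
  let result : List Char :=
    cols.foldl (fun res col =>
      let rows := if top_to_bottom then PySem.List.pyRange 0 nrows 1
                  else PySem.List.pyRange (nrows - 1) (-1) (-1)
      rows.foldl (fun res2 row =>
        match grid.get? (row, col) with
        | some ch => res2 ++ [ch]
        | none => res2) res) []
  String.ofList result

-- ===== PORT B =====
def columnar_read_alt (text : String) (width : Int) (col_order : Option (List Int)) (top_to_bottom : Bool) : String :=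
  let cols : List Int :=
    match col_order with
    | none => PySem.List.pyRange 0 width 1
    | some cs => cs
  -- text[col::width]; slice? is none only for step width = 0, which Pre_ excludes
  let parts : List (List Char) :=
    cols.foldl (fun ps col =>
      if 0 ≤ col ∧ col < width then
        let chunk := (PySem.List.slice? text.toList (some col) none width).getD []
        ps ++ [if top_to_bottom then chunk
               else (PySem.List.slice? chunk none none (-1)).getD []]   -- chunk[::-1]
      else ps) []
  String.ofList parts.flatten

-- ===== PRECONDITION & SPEC =====
-- Pre_ requires width ≥ 1: at width = 0 A raises ZeroDivisionError, and a non-positive width is a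
-- meaningless corner of the cipher on which A's value (stray cells of the negative-divmod grid) and
-- B's value (no valid columns, empty string) are both accidental; nobody would specify either.
def Pre_columnar_read (text : String) (width : Int) (col_order : Option (List Int)) (top_to_bottom : Bool) : Prop :=
  1 ≤ width
instance (text : String) (width : Int) (col_order : Option (List Int)) (top_to_bottom : Bool) : Decidable (Pre_columnar_read text width col_order top_to_bottom) := by unfold Pre_columnar_read; infer_instance

def pvWitness_columnar_read : String × Int × Option (List Int) × Bool := ("KRYPTOS", 3, some [2, 0, 1], true)

def Spec_columnar_read (text : String) (width : Int) (col_order : Option (List Int)) (top_to_bottom : Bool) (out : String) : Prop := out = columnar_read_alt text width col_order top_to_bottom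
instance (text : String) (width : Int) (col_order : Option (List Int)) (top_to_bottom : Bool) (out : String) : Decidable (Spec_columnar_read text width col_order top_to_bottom out) := by unfold Spec_columnar_read; infer_instance

-- ===== CLAIM (what is proved, stated in full; the proofs are below) =====
def Claim_equal_columnar_read : Prop := ∀ (text : String) (width : Int) (col_order : Option (List Int)) (top_to_bottom : Bool), Dom_columnar_read text width col_order top_to_bottom → Pre_columnar_read text width col_order top_to_bottom → Spec_columnar_read text width col_order top_to_bottom (columnar_read text width col_order top_to_bottom)

-- ===== LEMMAS AND PROOFS =====

-- the characters of column c read top-to-bottom: indices c, c+w, c+2w, … (m candidates)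
def colPick (l : List Char) (w c : Int) (m : Nat) : List Char :=
  (List.range m).filterMap (fun (k : Nat) => l[(c + w * (k : Int)).toNat]?)

theorem match_opt (res2 : List Char) (o : Option Char) :
    (match o with | some ch => res2 ++ [ch] | none => res2) = res2 ++ o.toList := by
  cases o <;> simp

theorem flatMap_toList {α β : Type} (f : α → Option β) (l : List α) :
    l.flatMap (fun x => (f x).toList) = l.filterMap f := by
  induction l with
  | nil => simp
  | cons x t ih => cases h : f x <;> simp [List.flatMap_cons, ih, h]

theorem flatten_map_filter {α β : Type} (p : α → Bool) (f : α → List β) (l : List α) :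
    ((l.filter p).map f).flatten = l.flatMap (fun x => if p x then f x else []) := by
  induction l with
  | nil => simp
  | cons x t ih => cases h : p x <;> simp [List.filter_cons, h, ih]

theorem ceil_mul_ge (w a : Int) (hw : 1 ≤ w) (ha : 0 ≤ a) : a ≤ w * ((a + w - 1) / w) := by
  have h0 := Int.ediv_add_emod (a + w - 1) w
  have h1 := Int.emod_nonneg (a + w - 1) (by omega : w ≠ 0)
  have h2 := Int.emod_lt_of_pos (a + w - 1) (by omega : 0 < w)
  omega

theorem div_unique (w n r c : Int) (hw : 1 ≤ w) (hn : 0 ≤ n) (hr : 0 ≤ r) (hc : 0 ≤ c)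
    (hcw : c < w) (he : r * w + c = n) : r = n / w ∧ c = n % w := by
  have h0 := Int.ediv_add_emod n w
  have h1 := Int.emod_nonneg n (by omega : w ≠ 0)
  have h2 := Int.emod_lt_of_pos n (by omega : 0 < w)
  have hcomm : r * w = w * r := mul_comm r w
  -- w * (n / w - r) = c - n % w with |c - n % w| < w forces n / w = r
  have key : w * (n / w - r) = c - n % w := by rw [mul_sub]; omega
  rcases lt_trichotomy (n / w - r) 0 with h | h | h
  · have h3 : w * (n / w - r) ≤ w * (-1) :=
      mul_le_mul_of_nonneg_left (by omega) (by omega)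
    have h4 : w * (-1) = -w := by ring
    omega
  · have h3 : w * (n / w - r) = w * 0 := by rw [show n / w - r = 0 from h]
    have h4 : w * (0 : Int) = 0 := by ring
    constructor <;> omega
  · have h3 : w * 1 ≤ w * (n / w - r) :=
      mul_le_mul_of_nonneg_left (by omega) (by omega)
    have h4 : w * 1 = w := by ring
    omega

-- the grid A builds, looked up: present exactly at real cells, value = text[r*w+c]
theorem grid_get (w : Int) (hw : 1 ≤ w) (l : List Char) (r c : Int) :
    ((PySem.List.enumerate l 0).foldl
      (fun g p => g.insert (PySem.Int.floordiv p.1 w, PySem.Int.mod p.1 w) p.2)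
      (PySem.Dict.empty : PySem.Dict (Int × Int) Char)).get? (r, c)
    = if 0 ≤ r ∧ 0 ≤ c ∧ c < w then l[(r * w + c).toNat]? else none := by
  induction l using List.reverseRecOn with
  | nil => simp [PySem.List.enumerate, PySem.Dict.get?_empty]
  | append_singleton t x ih =>
    rw [PySem.List.enumerate_append]
    have hsing : PySem.List.enumerate [x] (0 + (t.length : Int)) = [((t.length : Int), x)] := by
      simp [PySem.List.enumerate]
    rw [hsing, List.foldl_append]
    simp only [List.foldl_cons, List.foldl_nil]
    rw [PySem.Dict.get?_insert]
    have hfd : PySem.Int.floordiv (t.length : Int) w = (t.length : Int) / w := by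
      simp only [PySem.Int.floordiv]
      rw [Int.fdiv_eq_ediv]; simp [show (0:Int) ≤ w by omega]
    have hfm : PySem.Int.mod (t.length : Int) w = (t.length : Int) % w := by
      simp only [PySem.Int.mod]
      rw [Int.fmod_eq_emod]; simp [show (0:Int) ≤ w by omega]
    rw [hfd, hfm, ih]
    by_cases hkey : (r, c) = (((t.length : Int)) / w, ((t.length : Int)) % w)
    · -- the freshly inserted cell
      obtain ⟨hr, hc⟩ := Prod.mk.injEq .. ▸ hkey
      have h0 := Int.ediv_add_emod (t.length : Int) w
      have h1 := Int.emod_nonneg (t.length : Int) (by omega : w ≠ 0)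
      have h2 := Int.emod_lt_of_pos (t.length : Int) (by omega : 0 < w)
      have hdiv0 : 0 ≤ (t.length : Int) / w := Int.ediv_nonneg (Int.natCast_nonneg _) (by omega)
      have hidx : r * w + c = (t.length : Int) := by subst hr hc; linarith [h0, mul_comm ((t.length : Int) / w) w]
      have hcond : 0 ≤ r ∧ 0 ≤ c ∧ c < w := by subst hr hc; exact ⟨hdiv0, h1, h2⟩
      simp only [if_pos hkey, if_pos hcond, hidx]
      have : ((t.length : Int)).toNat = t.length := by omega
      rw [this, List.getElem?_concat_length]
    · simp only [if_neg hkey]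
      by_cases hcond : 0 ≤ r ∧ 0 ≤ c ∧ c < w
      · simp only [if_pos hcond]
        obtain ⟨hr, hc, hcw⟩ := hcond
        have hnn : 0 ≤ r * w + c := by
          have : 0 ≤ r * w := mul_nonneg hr (by omega)
          omega
        rcases lt_trichotomy ((r * w + c).toNat) t.length with hlt | heq | hgt
        · rw [List.getElem?_append_left hlt]
        · exfalso
          have : r * w + c = (t.length : Int) := by omega
          have := div_unique w (t.length : Int) r c hw (Int.natCast_nonneg _) hr hc hcw this
          exact hkey (by simp [Prod.ext_iff, this.1, this.2])
        · rw [List.getElem?_eq_none (by omega), List.getElem?_eq_none (by simp; omega)]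
      · simp only [if_neg hcond]

theorem colPick_ext (l : List Char) (w c : Int) (hw : 1 ≤ w) (hc : 0 ≤ c) (m1 m2 : Nat)
    (h1 : (l.length : Int) ≤ c + w * m1) (h2 : (l.length : Int) ≤ c + w * m2) :
    colPick l w c m1 = colPick l w c m2 := by
  -- entries at or beyond any saturating bound are none
  have key : ∀ (m m' : Nat), (l.length : Int) ≤ c + w * m → m ≤ m' →
      colPick l w c m' = colPick l w c m := by
    intro m m' hm hle
    unfold colPick
    have hsplit : m' = m + (m' - m) := by omega
    rw [hsplit, List.range_add, List.filterMap_append]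
    have hnone : List.filterMap (fun (k : Nat) => l[(c + w * (k : Int)).toNat]?)
        (List.map (fun x => m + x) (List.range (m' - m))) = [] := by
      rw [List.filterMap_eq_nil_iff]
      intro a ha
      simp only [List.mem_map, List.mem_range] at ha
      obtain ⟨j, _, rfl⟩ := ha
      apply List.getElem?_eq_none
      have hmono : w * (m : Int) ≤ w * ((m : Int) + (j : Int)) :=
        mul_le_mul_of_nonneg_left (by omega) (by omega)
      have hcast : (((m + j : Nat)) : Int) = (m : Int) + (j : Int) := by push_cast; ring
      rw [hcast]
      omega
    rw [hnone, List.append_nil]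
  rcases le_total m1 m2 with h | h
  · exact (key m1 m2 h1 h).symm
  · exact key m2 m1 h2 h

-- B's stride slice text[c::w] equals colPick with A's row count
theorem chunk_eq (l : List Char) (w c : Int) (hw : 1 ≤ w) (hc : 0 ≤ c) :
    (PySem.List.slice? l (some c) none w).getD []
      = colPick l w c (PySem.Int.floordiv ((l.length : Int) + w - 1) w).toNat := by
  have hN0 : 0 ≤ ((l.length : Int) + w - 1) / w := Int.ediv_nonneg (by omega) (by omega)
  have hfd : PySem.Int.floordiv ((l.length : Int) + w - 1) w = ((l.length : Int) + w - 1) / w := by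
    simp only [PySem.Int.floordiv]
    rw [Int.fdiv_eq_ediv]; simp [show (0:Int) ≤ w by omega]
  unfold PySem.List.slice? PySem.List.sliceIndices
  simp only [if_neg (by omega : ¬ w = 0), if_neg (by omega : ¬ w < 0), if_neg (by omega : ¬ c < 0)]
  by_cases hcn : c < (l.length : Int)
  · -- real column: the slice has ceil((n-c)/w) entries, A's count is ceil(n/w); both saturate
    rw [min_eq_left (by omega), if_pos (by omega : (0:Int) < w), if_pos hcn]
    show colPick l w c ((((l.length : Int)) - c + w - 1) / w).toNat
        = colPick l w c (PySem.Int.floordiv ((l.length : Int) + w - 1) w).toNat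
    have h0 : 0 ≤ ((l.length : Int) - c + w - 1) / w := Int.ediv_nonneg (by omega) (by omega)
    apply colPick_ext l w c hw hc
    · rw [show (((((l.length : Int) - c + w - 1) / w).toNat : Int))
            = ((l.length : Int) - c + w - 1) / w from by omega]
      have := ceil_mul_ge w ((l.length : Int) - c) hw (by omega)
      omega
    · rw [hfd, show (((((l.length : Int) + w - 1) / w).toNat : Int))
            = ((l.length : Int) + w - 1) / w from by omega]
      have := ceil_mul_ge w ((l.length : Int)) hw (by omega)
      omega
  · -- column start at or past the end of the text: both sides empty
    rw [min_eq_right (by omega), if_pos (by omega : (0:Int) < w),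
        if_neg (by omega : ¬ (l.length : Int) < (l.length : Int))]
    show colPick l w (l.length : Int) 0 = colPick l w c (PySem.Int.floordiv ((l.length : Int) + w - 1) w).toNat
    unfold colPick
    rw [List.range_zero, List.filterMap_nil]
    symm
    rw [List.filterMap_eq_nil_iff]
    intro k _
    apply List.getElem?_eq_none
    have : 0 ≤ w * (k : Int) := mul_nonneg (by omega) (Int.natCast_nonneg _)
    omega

-- the contribution of one requested column, A's form = B's form
theorem col_eq (w : Int) (hw : 1 ≤ w) (l : List Char) (tb : Bool) (col : Int) :
    List.filterMap
      (fun row =>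
        ((PySem.List.enumerate l 0).foldl
          (fun g p => g.insert (PySem.Int.floordiv p.1 w, PySem.Int.mod p.1 w) p.2)
          (PySem.Dict.empty : PySem.Dict (Int × Int) Char)).get? (row, col))
      (if tb then PySem.List.pyRange 0 (PySem.Int.floordiv ((l.length : Int) + w - 1) w) 1
       else PySem.List.pyRange (PySem.Int.floordiv ((l.length : Int) + w - 1) w - 1) (-1) (-1))
    = if decide (0 ≤ col ∧ col < w) = true then
        (if tb then (PySem.List.slice? l (some col) none w).getD []
         else (PySem.List.slice? ((PySem.List.slice? l (some col) none w).getD []) none none (-1)).getD [])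
      else [] := by
  by_cases hc : 0 ≤ col ∧ col < w
  · rw [show decide (0 ≤ col ∧ col < w) = true from by simp [hc.1, hc.2], if_pos rfl]
    have hcore : List.filterMap
        (fun row =>
          ((PySem.List.enumerate l 0).foldl
            (fun g p => g.insert (PySem.Int.floordiv p.1 w, PySem.Int.mod p.1 w) p.2)
            (PySem.Dict.empty : PySem.Dict (Int × Int) Char)).get? (row, col))
        (PySem.List.pyRange 0 (PySem.Int.floordiv ((l.length : Int) + w - 1) w) 1)
        = colPick l w col (PySem.Int.floordiv ((l.length : Int) + w - 1) w).toNat := by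
      rw [PySem.List.pyRange_one, List.filterMap_map,
          show PySem.Int.floordiv ((l.length : Int) + w - 1) w - 0
             = PySem.Int.floordiv ((l.length : Int) + w - 1) w from by ring]
      unfold colPick
      apply List.filterMap_congr
      intro k _
      simp only [Function.comp_apply]
      rw [grid_get w hw l, if_pos ⟨by omega, hc.1, hc.2⟩,
          show ((0 : Int) + (k : Int)) * w + col = col + w * (k : Int) by ring]
    cases tb with
    | true =>
      rw [if_pos rfl, if_pos rfl, hcore, chunk_eq l w col hw hc.1]
    | false =>
      rw [if_neg (by simp : ¬ (false = true)), if_neg (by simp : ¬ (false = true))]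
      rw [show PySem.List.pyRange (PySem.Int.floordiv ((l.length : Int) + w - 1) w - 1) (-1) (-1)
            = (PySem.List.pyRange 0 (PySem.Int.floordiv ((l.length : Int) + w - 1) w) 1).reverse by
          rw [PySem.List.pyRange_neg_one_eq_reverse]; norm_num]
      rw [List.filterMap_reverse, hcore, PySem.List.slice?_none_none_neg_one, Option.getD_some,
          chunk_eq l w col hw hc.1]
  · rw [show decide (0 ≤ col ∧ col < w) = false from by
        simp only [decide_eq_false_iff_not]; exact hc,
       if_neg (by simp : ¬ (false = true))]
    rw [List.filterMap_eq_nil_iff]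
    intro row _
    rw [grid_get w hw l, if_neg (by tauto)]

theorem columnar_read_eq_lists (text : String) (width : Int) (col_order : Option (List Int))
    (top_to_bottom : Bool) (hw : 1 ≤ width) :
    columnar_read text width col_order top_to_bottom
      = columnar_read_alt text width col_order top_to_bottom := by
  unfold columnar_read columnar_read_alt
  simp only [match_opt, PySem.List.foldl_append_eq_flatMap, flatMap_toList]
  rw [PySem.List.foldl_append_ite]
  simp only [List.nil_append, flatten_map_filter]
  apply congrArg String.ofList
  apply List.flatMap_congr
  intro col _
  exact col_eq width hw text.toList top_to_bottom col

-- ===== VERDICT (by name: the statement is the Claim_ definition above) =====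
theorem columnar_read_spec : Claim_equal_columnar_read := by
  intro text width col_order top_to_bottom _hdom hpre
  unfold Spec_columnar_read
  exact columnar_read_eq_lists text width col_order top_to_bottom hpre
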